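-- pv_equiv track=rewrite | github.com/lamm-mit/MusicAnalysis | scripts/scales_mode_equivalence_cli.py | symmetry_order
-- ===== SOURCE A (Python) =====
-- from typing import Dict, List, Tuple
--
-- def symmetry_order(steps: List[int], dihedral: bool) -> int:
--     k = len(steps)
--     if k == 0:
--         return 0
--     # Count group elements that fix the pattern
--     count = 0
--     # rotations
--     for t in range(k):
--         if steps == steps[t:] + steps[:t]:
--             count += 1
--     if dihedral:
--         rev = list(reversed(steps))
--         for t in range(k):
--             if steps == rev[t:] + rev[:t]:
--                 count += 1
--     return count
-- ===== SOURCE B (Python) =====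
-- def symmetry_order(steps, dihedral):
--     k = len(steps)
--     if k == 0:
--         return 0
--
--     doubled = steps + steps
--
--     def match_at(buf, off):
--         # does buf[off:off+k] equal steps?  (early exit on first mismatch)
--         for i in range(k):
--             if buf[off + i] != steps[i]:
--                 return False
--         return True
--
--     # minimal positive rotation fixing the pattern (m == k always matches)
--     m = 1
--     while not match_at(doubled, m):
--         m += 1
--     total = k // m
--     if dihedral:
--         drev = doubled[::-1]  # == rev + rev where rev = reversed(steps)
--         if any(match_at(drev, t) for t in range(k)):
--             total += k // m
--     return total
-- ===== Notes on version B (the rewrite author's own statement) =====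
-- stated objective: faster
-- what changed: Instead of counting all k rotations (and all k reflections) with O(k) slice rebuilds each, B finds the minimal rotation period m by early-exit elementwise comparison against the doubled list and returns k//m, and for reflections just tests existence of one matching shift of the doubled reversal and reuses k//m (symmetries fixing the pattern form a cyclic group of order k/m, and reflections fixing it form a coset of the same size).
import Mathlib
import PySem

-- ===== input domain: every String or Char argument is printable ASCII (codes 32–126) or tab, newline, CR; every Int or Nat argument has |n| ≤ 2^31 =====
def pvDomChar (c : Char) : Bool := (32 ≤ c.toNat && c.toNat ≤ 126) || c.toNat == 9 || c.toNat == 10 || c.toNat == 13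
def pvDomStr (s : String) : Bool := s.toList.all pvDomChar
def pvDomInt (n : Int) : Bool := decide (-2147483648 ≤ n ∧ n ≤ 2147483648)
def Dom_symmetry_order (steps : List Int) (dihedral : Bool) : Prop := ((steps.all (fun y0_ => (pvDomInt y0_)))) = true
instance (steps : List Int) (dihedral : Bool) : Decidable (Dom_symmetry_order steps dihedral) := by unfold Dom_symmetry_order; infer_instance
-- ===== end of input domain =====

-- B replaces A's two full O(k^2) scans by finding the minimal rotation period m (early-exit
-- elementwise comparison against the doubled list) and returning k/m, reusing k/m for the
-- reflection coset after a single existence test.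


-- ===== PORT A =====
def symmetry_order (steps : List Int) (dihedral : Bool) : Int :=
  let k := steps.length
  if k = 0 then 0
  else
    -- rotations:  for t in range(k): if steps == steps[t:] + steps[:t]: count += 1
    let count : Int :=
      (PySem.List.pyRange 0 (k : Int) 1).foldl
        (fun count t =>
          if steps == PySem.List.slice steps (some t) none ++ PySem.List.slice steps none (some t)
          then count + 1 else count) 0
    if dihedral then
      let rev := steps.reverse     -- list(reversed(steps))
      (PySem.List.pyRange 0 (k : Int) 1).foldl
        (fun count t =>
          if steps == PySem.List.slice rev (some t) none ++ PySem.List.slice rev none (some t)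
          then count + 1 else count) count
    else count

-- ===== PORT B =====
-- 'def match_at(buf, off): for i in range(k): if buf[off+i] != steps[i]: return False / return True'
-- (List.all short-circuits like the early-return loop; pyGetD is exact here because B only ever
--  calls match_at with 0 ≤ off ≤ k and buf of length 2k, so every index is in range)
def pvMatchAt (steps buf : List Int) (k : Nat) (off : Int) : Bool :=
  (List.range k).all (fun i =>
    PySem.List.pyGetD buf (off + (i : Int)) 0 == PySem.List.pyGetD steps (i : Int) 0)

-- 'm = 1; while not match_at(doubled, m): m += 1' — fuel makes the loop structural; fuel = k is
-- enough because offset k always matches, so the fuel-exhausted arm is never reached by B below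
def pvFindPeriod (steps doubled : List Int) (k : Nat) : Nat → Nat → Nat
  | 0, m => m
  | fuel+1, m => if pvMatchAt steps doubled k ((m : Nat) : Int) then m
                 else pvFindPeriod steps doubled k fuel (m+1)

def symmetry_order_alt (steps : List Int) (dihedral : Bool) : Int :=
  let k := steps.length
  if k = 0 then 0
  else
    let doubled := steps ++ steps
    let m := pvFindPeriod steps doubled k k 1
    let total : Int := ((k / m : Nat) : Int)   -- k // m (floor division of nonnegative ints)
    if dihedral then
      let drev := (PySem.List.slice? doubled none none (-1)).getD []   -- doubled[::-1]
      if (PySem.List.pyRange 0 (k : Int) 1).any (fun t => pvMatchAt steps drev k t)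
      then total + ((k / m : Nat) : Int)
      else total
    else total

-- ===== PRECONDITION & SPEC =====
def Spec_symmetry_order (steps : List Int) (dihedral : Bool) (out : Int) : Prop := out = symmetry_order_alt steps dihedral
instance (steps : List Int) (dihedral : Bool) (out : Int) : Decidable (Spec_symmetry_order steps dihedral out) := by unfold Spec_symmetry_order; infer_instance

-- ===== CLAIM (what is proved, stated in full; the proofs are below) =====
def Claim_equal_symmetry_order : Prop := ∀ (steps : List Int) (dihedral : Bool), Dom_symmetry_order steps dihedral → Spec_symmetry_order steps dihedral (symmetry_order steps dihedral)

-- ===== LEMMAS AND PROOFS =====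

-- the length-k window of the doubled list at offset 'off' is the rotation by 'off'
theorem pv_double_window (r : List Int) (off : Nat) (hoff : off ≤ r.length) :
    ((r ++ r).drop off).take r.length = r.rotate off := by
  rw [List.drop_append, List.rotate_eq_drop_append_take hoff]
  have h1 : off - r.length = 0 := by omega
  rw [h1, List.drop_zero, List.take_append]
  congr 1
  · exact List.take_of_length_le (by simp)
  · congr 1; simp; omega

-- B's match_at on a doubled list tests 'this rotation equals steps'
theorem pv_matchAt_iff (s r : List Int) (off : Nat) (hlen : r.length = s.length)
    (hoff : off ≤ s.length) :
    (pvMatchAt s (r ++ r) s.length ((off : Nat) : Int) = true) ↔ r.rotate off = s := by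
  have hkrot : (r.rotate off).length = s.length := by simp [hlen]
  have hwin : ((r ++ r).drop off).take s.length = r.rotate off := by
    rw [← hlen]; exact pv_double_window r off (by omega)
  have key : ∀ (i : Nat) (hi : i < s.length),
      ((PySem.List.pyGetD (r ++ r) ((off : Int) + (i : Int)) 0 ==
        PySem.List.pyGetD s ((i : Nat) : Int) 0) = true ↔
       (r.rotate off)[i]'(by rw [List.length_rotate, hlen]; exact hi) = s[i]'hi) := by
    intro i hi
    have hcast : ((off : Int) + (i : Int)) = (((off + i : Nat)) : Int) := by push_cast; ring
    have hlt : off + i < (r ++ r).length := by simp [hlen]; omega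
    have e1 : PySem.List.pyGetD (r ++ r) ((off : Int) + (i : Int)) 0 = (r ++ r)[off + i]'hlt := by
      rw [hcast, PySem.List.pyGetD_natCast]
      rw [List.getD_eq_getElem _ _ hlt]
    have e2 : PySem.List.pyGetD s ((i : Nat) : Int) 0 = s[i]'hi := by
      rw [PySem.List.pyGetD_natCast]
      rw [List.getD_eq_getElem _ _ hi]
    have e3 : (r.rotate off)[i]'(by rw [List.length_rotate, hlen]; exact hi) = (r ++ r)[off + i]'hlt := by
      have h4 := List.getElem_of_eq hwin.symm (by rw [List.length_rotate, hlen]; omega : i < (r.rotate off).length)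
      rw [h4]
      simp [List.getElem_take, List.getElem_drop]
    rw [e1, e2, e3, beq_iff_eq]
  unfold pvMatchAt
  rw [List.all_eq_true]
  constructor
  · intro h
    apply List.ext_getElem hkrot
    intro i h1 h2
    exact (key i h2).mp (h i (List.mem_range.mpr h2))
  · intro h i hmem
    have hi := List.mem_range.mp hmem
    exact (key i hi).mpr (List.getElem_of_eq h _)

-- B's while loop returns the least matching offset in [m0, m0+fuel), given that one exists
theorem pv_findPeriod_spec (s d : List Int) (k : Nat) :
    ∀ (fuel m0 : Nat), (∃ j : Nat, m0 ≤ j ∧ j < m0 + fuel ∧ pvMatchAt s d k ((j : Nat) : Int) = true) →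
      pvMatchAt s d k ((pvFindPeriod s d k fuel m0 : Nat) : Int) = true ∧
      m0 ≤ pvFindPeriod s d k fuel m0 ∧
      ∀ j : Nat, m0 ≤ j → j < pvFindPeriod s d k fuel m0 → ¬ pvMatchAt s d k ((j : Nat) : Int) = true := by
  intro fuel
  induction fuel with
  | zero =>
    rintro m0 ⟨j, h1, h2, _⟩; omega
  | succ n ih =>
    intro m0 hex
    by_cases hm : pvMatchAt s d k ((m0 : Nat) : Int) = true
    · have hres : pvFindPeriod s d k (n+1) m0 = m0 := by simp [pvFindPeriod, hm]
      rw [hres]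
      exact ⟨hm, le_refl _, fun j h1 h2 => by omega⟩
    · obtain ⟨j, hj1, hj2, hj3⟩ := hex
      have hjne : j ≠ m0 := by rintro rfl; exact hm hj3
      have ihres := ih (m0 + 1) ⟨j, by omega, by omega, hj3⟩
      have hstep : pvFindPeriod s d k (n+1) m0 = pvFindPeriod s d k n (m0+1) := by
        simp [pvFindPeriod, hm]
      refine ⟨?_, ?_, ?_⟩ <;> rw [hstep]
      · exact ihres.1
      · omega
      · intro j' h1 h2
        rcases Nat.eq_or_lt_of_le h1 with rfl | h
        · exact hm
        · exact ihres.2.2 j' (by omega) h2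

theorem pv_rotate_mul (s : List Int) (m j : Nat) (hm : s.rotate m = s) :
    s.rotate (j * m) = s := by
  induction j with
  | zero => simp
  | succ n ih =>
    have h := List.rotate_rotate s (n * m) m
    rw [ih, hm] at h
    rw [Nat.succ_mul]
    exact h.symm

-- the rotations fixing s are exactly the multiples of the minimal positive one
theorem pv_rotate_iff_dvd (s : List Int) (m : Nat) (hm0 : 0 < m) (hm : s.rotate m = s)
    (hmin : ∀ j, 0 < j → j < m → s.rotate j ≠ s) : ∀ n, s.rotate n = s ↔ m ∣ n := by
  intro n
  constructor
  · intro h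
    have h1 : s.rotate (m * (n / m)) = s := by rw [Nat.mul_comm]; exact pv_rotate_mul s m (n / m) hm
    have h2 := List.rotate_rotate s (m * (n / m)) (n % m)
    rw [h1, Nat.div_add_mod n m] at h2
    have hrot : s.rotate (n % m) = s := h2.trans h
    by_contra hnd
    have hr0 : n % m ≠ 0 := fun h0 => hnd (Nat.dvd_of_mod_eq_zero h0)
    exact hmin (n % m) (Nat.pos_of_ne_zero hr0) (Nat.mod_lt n hm0) hrot
  · rintro ⟨c, rfl⟩
    rw [Nat.mul_comm]
    exact pv_rotate_mul s m c hm

theorem pv_dvd_add_mod (m t c : Nat) : m ∣ (t + c) ↔ m ∣ (t + c % m) := by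
  have hd : m * (c / m) + c % m = c := Nat.div_add_mod c m
  constructor
  · intro h
    have h2 : m ∣ m * (c / m) := Dvd.intro _ rfl
    have h3 : t + c % m = (t + c) - m * (c / m) := by omega
    rw [h3]
    exact Nat.dvd_sub h h2
  · intro h
    have h2 : t + c = (t + c % m) + m * (c / m) := by omega
    rw [h2]
    exact Nat.dvd_add h (Dvd.intro _ rfl)

-- exactly one t in a window of length m has m ∣ t + c
theorem pv_count_range_m (m c : Nat) (hm : 0 < m) :
    (List.range m).countP (fun t => decide (m ∣ (t + c))) = 1 := by
  have hb : c % m < m := Nat.mod_lt _ hm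
  have hr : (m - c % m) % m < m := Nat.mod_lt _ hm
  have hiff : ∀ t ∈ List.range m,
      ((fun t => decide (m ∣ (t + c))) t = true ↔ ((fun t => t == (m - c % m) % m) t = true)) := by
    intro t ht
    have htm : t < m := List.mem_range.mp ht
    simp only [decide_eq_true_eq, beq_iff_eq]
    rw [pv_dvd_add_mod]
    by_cases hb0 : c % m = 0
    · rw [hb0]
      simp only [Nat.add_zero, Nat.sub_zero, Nat.mod_self]
      constructor
      · intro h; exact Nat.eq_zero_of_dvd_of_lt h htm |>.symm ▸ rfl
      · rintro rfl; exact Dvd.intro 0 rfl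
    · have hrr : (m - c % m) % m = m - c % m := Nat.mod_eq_of_lt (by omega)
      rw [hrr]
      constructor
      · rintro ⟨e, he⟩
        rcases e with _ | _ | e
        · omega
        · omega
        · have h2m : m * (e + 1 + 1) = m * e + m + m := by ring
          rw [h2m] at he
          omega
      · intro h
        exact ⟨1, by omega⟩
  rw [List.countP_congr hiff, ← List.count_eq_countP]
  exact List.count_eq_one_of_mem (List.nodup_range) (List.mem_range.mpr hr)

-- over q full windows: q hits, for any shift c
theorem pv_countP_dvd_shift (m q c : Nat) (hm : 0 < m) :
    (List.range (q * m)).countP (fun t => decide (m ∣ (t + c))) = q := by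
  induction q with
  | zero => simp
  | succ n ih =>
    have h1 : (n + 1) * m = n * m + m := by ring
    rw [h1, List.range_add, List.countP_append, ih, List.countP_map]
    have hcong : ∀ i ∈ List.range m,
        (((fun t => decide (m ∣ (t + c))) ∘ (fun i => n * m + i)) i = true ↔
         ((fun t => decide (m ∣ (t + c))) i = true)) := by
      intro i _
      simp only [Function.comp_apply, decide_eq_true_eq]
      constructor
      · intro h
        have h2 : m ∣ n * m := Dvd.intro_left _ rfl
        have h3 : i + c = (n * m + i + c) - n * m := by omega
        rw [h3]
        exact Nat.dvd_sub h h2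
      · intro h
        have h2 : n * m + i + c = (i + c) + n * m := by omega
        rw [h2]
        exact Nat.dvd_add h (Dvd.intro_left _ rfl)
    rw [List.countP_congr hcong, pv_count_range_m m c hm]

-- counting a divisibility-by-M condition over range(len) when M * q = len
theorem pv_countP_eq (s : List Int) (M q c : Nat) (hM : 0 < M) (hq : s.length = M * q)
    (P : Nat → Prop) [DecidablePred P] (hP : ∀ n, P n ↔ M ∣ (n + c)) :
    (List.range s.length).countP (fun j => decide (P j)) = q := by
  have h1 : ∀ j ∈ List.range s.length, (decide (P j) = true ↔ decide (M ∣ (j + c)) = true) := by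
    intro j _
    simp only [decide_eq_true_eq]
    exact hP j
  rw [List.countP_congr h1, hq, Nat.mul_comm]
  exact pv_countP_dvd_shift M q c hM

-- A's counting loop, as a countP over rotations
theorem pv_foldA (s r : List Int) (hlen : r.length = s.length) (init : Int) :
    (PySem.List.pyRange 0 (s.length : Int) 1).foldl
      (fun count t =>
        if s == PySem.List.slice r (some t) none ++ PySem.List.slice r none (some t)
        then count + 1 else count) init
    = init + ((List.range s.length).countP (fun j => decide (r.rotate j = s)) : Int) := by
  rw [PySem.List.pyRange_one, show ((s.length : Int) - 0).toNat = s.length by omega, List.foldl_map]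
  have hstep : ∀ (c : Int) (j : Nat), j ∈ List.range s.length →
      (if s == PySem.List.slice r (some ((0 : Int) + (j : Int))) none ++
              PySem.List.slice r none (some ((0 : Int) + (j : Int)))
       then c + 1 else c)
      = (if (fun j => decide (r.rotate j = s)) j then c + 1 else c) := by
    intro c j hj
    have hjk : j < s.length := List.mem_range.mp hj
    have hz : ((0 : Int) + (j : Int)) = ((j : Nat) : Int) := by ring
    rw [hz, PySem.List.slice_from_natCast, PySem.List.slice_to_natCast]
    have hcond : (s == List.drop j r ++ List.take j r) = decide (r.rotate j = s) := by
      rw [Bool.eq_iff_iff, beq_iff_eq, decide_eq_true_eq,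
          List.rotate_eq_drop_append_take (by omega : j ≤ r.length)]
      exact eq_comm
    rw [hcond]
  rw [PySem.List.foldl_congr_mem _ _ _ _ hstep, PySem.List.foldl_if_add_one]

theorem pv_main (steps : List Int) (dihedral : Bool) :
    symmetry_order steps dihedral = symmetry_order_alt steps dihedral := by
  by_cases hk0 : steps.length = 0
  · simp [symmetry_order, symmetry_order_alt, hk0]
  · have hkpos : 0 < steps.length := Nat.pos_of_ne_zero hk0
    have hQk : pvMatchAt steps (steps ++ steps) steps.length ((steps.length : Nat) : Int) = true :=
      (pv_matchAt_iff steps steps steps.length rfl (le_refl _)).mpr (List.rotate_length steps)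
    have hspec := pv_findPeriod_spec steps (steps ++ steps) steps.length steps.length 1
      ⟨steps.length, hkpos, by omega, hQk⟩
    have hm1 : 1 ≤ pvFindPeriod steps (steps ++ steps) steps.length steps.length 1 := hspec.2.1
    have hmle : pvFindPeriod steps (steps ++ steps) steps.length steps.length 1 ≤ steps.length := by
      by_contra hgt
      exact (hspec.2.2 steps.length hkpos (by omega)) hQk
    have hrotm : steps.rotate (pvFindPeriod steps (steps ++ steps) steps.length steps.length 1) = steps :=
      (pv_matchAt_iff steps steps _ rfl hmle).mp hspec.1
    have hmin : ∀ j, 0 < j → j < pvFindPeriod steps (steps ++ steps) steps.length steps.length 1 →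
        steps.rotate j ≠ steps := by
      intro j hj1 hj2 hrot
      exact hspec.2.2 j hj1 hj2 ((pv_matchAt_iff steps steps j rfl (by omega)).mpr hrot)
    have hdvd := pv_rotate_iff_dvd steps _ hm1 hrotm hmin
    obtain ⟨q, hq⟩ := (hdvd steps.length).mp (List.rotate_length steps)
    have hkm : steps.length / pvFindPeriod steps (steps ++ steps) steps.length steps.length 1 = q :=
      Nat.div_eq_of_eq_mul_left hm1 (hq.trans (Nat.mul_comm _ _))
    have hrotcount : (List.range steps.length).countP (fun j => decide (steps.rotate j = steps)) = q :=
      pv_countP_eq steps _ q 0 hm1 hq (fun j => steps.rotate j = steps)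
        (fun n => by rw [Nat.add_zero]; exact hdvd n)
    cases dihedral with
    | false =>
      simp only [symmetry_order, symmetry_order_alt, hk0, if_false, Bool.false_eq_true]
      rw [pv_foldA steps steps rfl 0, hrotcount, hkm]
      omega
    | true =>
      have hrevlen : steps.reverse.length = steps.length := by simp
      have hany : ((PySem.List.pyRange 0 ((steps.length : Nat) : Int) 1).any
            (fun t => pvMatchAt steps ((steps ++ steps).reverse) steps.length t))
          = (List.range steps.length).any (fun j => decide (steps.reverse.rotate j = steps)) := by
        rw [List.reverse_append, PySem.List.pyRange_one,
            show (((steps.length : Nat) : Int) - 0).toNat = steps.length by omega, List.any_map]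
        apply PySem.List.any_congr_mem
        intro j hj
        have hjk : j < steps.length := List.mem_range.mp hj
        show pvMatchAt steps (steps.reverse ++ steps.reverse) steps.length ((0 : Int) + (j : Int)) = _
        have hz : ((0 : Int) + (j : Int)) = ((j : Nat) : Int) := by ring
        rw [hz, Bool.eq_iff_iff, decide_eq_true_eq]
        exact pv_matchAt_iff steps steps.reverse j hrevlen (by omega)
      simp only [symmetry_order, symmetry_order_alt, hk0, if_false, if_true]
      rw [pv_foldA steps steps rfl 0, hrotcount,
          PySem.List.slice?_none_none_neg_one, Option.getD_some, hany,
          pv_foldA steps steps.reverse hrevlen _]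
      by_cases hex : (List.range steps.length).any (fun j => decide (steps.reverse.rotate j = steps)) = true
      · rw [hex, if_pos rfl]
        obtain ⟨t0, ht0mem, ht0p⟩ := List.any_eq_true.mp hex
        have ht0k : t0 < steps.length := List.mem_range.mp ht0mem
        have ht0 : steps.reverse.rotate t0 = steps := of_decide_eq_true ht0p
        have hrev : steps.rotate (steps.length - t0) = steps.reverse := by
          have h1 := List.rotate_rotate steps.reverse t0 (steps.length - t0)
          rw [ht0, Nat.add_sub_cancel' (Nat.le_of_lt ht0k)] at h1
          have h2 : steps.reverse.rotate steps.length = steps.reverse := by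
            rw [← hrevlen]; exact List.rotate_length _
          exact h1.trans h2
        have hreflcount : (List.range steps.length).countP
            (fun j => decide (steps.reverse.rotate j = steps)) = q :=
          pv_countP_eq steps _ q (steps.length - t0) hm1 hq
            (fun j => steps.reverse.rotate j = steps)
            (fun n => by
              show steps.reverse.rotate n = steps ↔ _
              rw [← hrev, List.rotate_rotate, Nat.add_comm n (steps.length - t0)]
              exact hdvd _)
        rw [hreflcount, hkm]
        omega
      · rw [Bool.not_eq_true] at hex
        rw [hex]
        have hzero : (List.range steps.length).countP
            (fun j => decide (steps.reverse.rotate j = steps)) = 0 := by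
          rw [List.countP_eq_zero]
          intro j hj hp
          have h2 := List.any_eq_true.not.mp (by rw [hex]; simp)
          exact h2 ⟨j, hj, hp⟩
        rw [hzero, hkm]
        simp

-- ===== VERDICT (by name: the statement is the Claim_ definition above) =====
theorem symmetry_order_spec : Claim_equal_symmetry_order := by
  intro steps dihedral _
  unfold Spec_symmetry_order
  exact pv_main steps dihedral
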